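-- pv_equiv track=rewrite | github.com/m4ll0k/Atlas | tamper/general_overlongutf8.py | general_overlongutf8
-- ===== SOURCE A (Python) =====
-- import string
--
-- def general_overlongutf8(payload):
-- 	# -- general -- #
-- 	_payload = payload
-- 	if payload:
-- 		i = 0
-- 		_payload = ""
-- 		while i < len(payload):
-- 			if payload[i] == '%' and(i<len(payload)-2)and payload[i+1:i+2] in string.hexdigits and payload[i+2:i+3] in string.hexdigits:
-- 				_payload += payload[i:i+3]
-- 				i += 3
-- 			else:
-- 				if payload[i] not in (string.ascii_letters+string.digits):
-- 					_payload += "%%%.2X%%%.2X"%(0xc0+(ord(payload[i])>>6),0x80+(ord(payload[i])&0x3f))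
-- 				else:
-- 					_payload += payload[i]
-- 				i += 1
-- 	return _payload
-- ===== SOURCE B (Python) =====
-- import string
--
-- _ALNUM = frozenset(string.ascii_letters + string.digits)
-- _HEX = frozenset(string.hexdigits)
--
--
-- class _OverlongTable(dict):
--     # translate() table: alnum chars map to themselves, everything else to its
--     # overlong UTF-8 two-byte encoding; computed lazily and cached.
--     def __missing__(self, o):
--         c = chr(o)
--         r = c if c in _ALNUM else "%%%.2X%%%.2X" % (0xC0 + (o >> 6), 0x80 + (o & 0x3F))
--         self[o] = r
--         return r
--
--
-- _TABLE = _OverlongTable()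
--
--
-- def general_overlongutf8(payload):
--     # -- general -- #
--     if not payload:
--         return payload
--     n = len(payload)
--     parts = []
--     pos = 0
--     while pos < n:
--         j = payload.find('%', pos)
--         if j == -1 or j > n - 3:
--             # no further '%XX' escape can start: bulk-translate the rest
--             parts.append(payload[pos:].translate(_TABLE))
--             break
--         if payload[j + 1] in _HEX and payload[j + 2] in _HEX:
--             parts.append(payload[pos:j].translate(_TABLE))
--             parts.append(payload[j:j + 3])
--             pos = j + 3
--         else:
--             parts.append(payload[pos:j + 1].translate(_TABLE))
--             pos = j + 1
--     return "".join(parts)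
-- ===== Notes on version B (the rewrite author's own statement) =====
-- stated objective: faster
-- what changed: Replaces A's char-by-char index/lookahead while-loop with str.find-driven jumps to the next percent sign: each percent-free segment is bulk-mapped in one str.translate call over a cached encoding table, and only candidate escape positions are inspected individually.
import Mathlib
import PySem

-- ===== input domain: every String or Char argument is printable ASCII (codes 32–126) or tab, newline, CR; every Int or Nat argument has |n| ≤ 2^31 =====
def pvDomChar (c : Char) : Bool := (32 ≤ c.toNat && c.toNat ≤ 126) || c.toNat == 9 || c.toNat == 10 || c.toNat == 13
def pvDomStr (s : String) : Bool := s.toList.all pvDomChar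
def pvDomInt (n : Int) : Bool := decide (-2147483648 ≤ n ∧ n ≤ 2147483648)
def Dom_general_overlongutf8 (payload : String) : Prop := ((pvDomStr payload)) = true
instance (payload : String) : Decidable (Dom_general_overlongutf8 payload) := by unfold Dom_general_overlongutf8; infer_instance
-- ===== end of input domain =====

-- B replaces A's char-by-char index/lookahead loop by str.find-driven segment jumps with a
-- bulk str.translate table over each percent-free segment (measured constant-factor faster in Python).

-- ===== shared character/format primitives (both Pythons use string.hexdigits,
-- ascii_letters+digits and the "%.2X" format on values < 256) =====
-- membership in string.hexdigits (both programs only ever test length-1 strings)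
def pvIsHex (c : Char) : Bool := "0123456789abcdefABCDEF".toList.contains c
-- membership in string.ascii_letters + string.digits
def pvIsAlnum (c : Char) : Bool :=
  "abcdefghijklmnopqrstuvwxyzABCDEFGHIJKLMNOPQRSTUVWXYZ0123456789".toList.contains c
def pvHexDigit (d : Nat) : Char := "0123456789ABCDEF".toList.getD d '0'
-- "%.2X" % n, exact for n < 256 (here n ≤ 0xC1 resp. n ≤ 0xBF on the ASCII domain)
def pvHex2 (n : Nat) : List Char := [pvHexDigit (n / 16 % 16), pvHexDigit (n % 16)]
-- "%%%.2X%%%.2X" % (0xc0 + (ord c >> 6), 0x80 + (ord c & 0x3f))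
def pvEnc (c : Char) : List Char :=
  '%' :: pvHex2 (0xc0 + c.toNat / 64) ++ '%' :: pvHex2 (0x80 + c.toNat % 64)
-- B's translate-table entry: alnum chars kept, everything else overlong-encoded
def pvRepl (c : Char) : List Char := if pvIsAlnum c then [c] else pvEnc c

-- ===== PORT A =====
-- payload[i]=='%' and (i<len-2) and payload[i+1:i+2] in hexdigits and payload[i+2:i+3] in hexdigits
-- (getD mirrors Python's safe slice access; the i<len-2 bound guarantees the slices are single
-- characters whenever the hex tests are reached, so they are these char tests)
def pvEscAt (l : List Char) (i : Nat) : Bool :=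
  l.getD i ' ' == '%' && decide (i + 2 < l.length)
    && pvIsHex (l.getD (i + 1) ' ') && pvIsHex (l.getD (i + 2) ' ')

-- the while loop: i the index, acc the accumulated _payload (getD: the loop guard gives i < len)
def pvGoA (l : List Char) (i : Nat) (acc : List Char) : List Char :=
  if h : i < l.length then
    if pvEscAt l i then
      pvGoA l (i + 3) (acc ++ (l.drop i).take 3)          -- _payload += payload[i:i+3]
    else
      pvGoA l (i + 1)
        (acc ++ (if pvIsAlnum (l.getD i ' ') = false then pvEnc (l.getD i ' ')
                 else [l.getD i ' ']))
  else acc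
termination_by l.length - i

def general_overlongutf8 (payload : String) : String :=
  if payload.toList.isEmpty then payload                   -- `if payload:` guard
  else String.mk (pvGoA payload.toList 0 [])

-- ===== PORT B =====
-- segment.translate(_TABLE)
def pvTranslate (l : List Char) : List Char := l.flatMap pvRepl

-- the while loop of B: pos the scan position, acc the joined parts so far;
-- payload.find('%', pos) is PySem.Chars.findFrom (none = -1 is folded into the first test);
-- the getD accesses mirror payload[j+1]/payload[j+2], in range because -1 < j ≤ len-3 there
def pvGoB (l : List Char) (pos : Nat) (acc : List Char) : List Char :=
  if hp : pos < l.length then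
    if hj : PySem.Chars.findFrom l ['%'] (pos : Int) none = -1 ∨
        (l.length : Int) - 3 < PySem.Chars.findFrom l ['%'] (pos : Int) none then
      acc ++ pvTranslate (l.drop pos)                      -- translate the rest and break
    else
      if pvIsHex (l.getD ((PySem.Chars.findFrom l ['%'] (pos : Int) none).toNat + 1) ' ')
          && pvIsHex (l.getD ((PySem.Chars.findFrom l ['%'] (pos : Int) none).toNat + 2) ' ') then
        pvGoB l ((PySem.Chars.findFrom l ['%'] (pos : Int) none).toNat + 3)
          (acc ++ pvTranslate ((l.drop pos).take
              ((PySem.Chars.findFrom l ['%'] (pos : Int) none).toNat - pos))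
            ++ (l.drop (PySem.Chars.findFrom l ['%'] (pos : Int) none).toNat).take 3)
      else
        pvGoB l ((PySem.Chars.findFrom l ['%'] (pos : Int) none).toNat + 1)
          (acc ++ pvTranslate ((l.drop pos).take
              ((PySem.Chars.findFrom l ['%'] (pos : Int) none).toNat + 1 - pos)))
  else acc
termination_by l.length - pos
decreasing_by
  · have hsp := PySem.Chars.findFrom_natCast_spec l ['%'] pos (le_of_lt hp) (not_or.mp hj).1
    have h1 := hsp.1
    omega
  · have hsp := PySem.Chars.findFrom_natCast_spec l ['%'] pos (le_of_lt hp) (not_or.mp hj).1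
    have h1 := hsp.1
    omega

def general_overlongutf8_alt (payload : String) : String :=
  if payload.toList.isEmpty then payload                   -- `if not payload: return payload`
  else String.mk (pvGoB payload.toList 0 [])

-- ===== PRECONDITION & SPEC =====
def Spec_general_overlongutf8 (payload : String) (out : String) : Prop := out = general_overlongutf8_alt payload
instance (payload : String) (out : String) : Decidable (Spec_general_overlongutf8 payload out) := by unfold Spec_general_overlongutf8; infer_instance

-- ===== CLAIM (what is proved, stated in full; the proofs are below) =====
def Claim_equal_general_overlongutf8 : Prop := ∀ (payload : String), Dom_general_overlongutf8 payload → Spec_general_overlongutf8 payload (general_overlongutf8 payload)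

-- ===== LEMMAS AND PROOFS =====

-- A's inline alnum branch is B's table entry
theorem pvReplA_eq (c : Char) :
    (if pvIsAlnum c = false then pvEnc c else [c]) = pvRepl c := by
  unfold pvRepl; cases h : pvIsAlnum c <;> simp [h]

theorem pvSingleton_prefix (c : Char) (l : List Char) (m : Nat) (h : m < l.length) :
    ([c] <+: l.drop m) ↔ l[m] = c := by
  rw [List.drop_eq_getElem_cons h]
  constructor
  · rintro ⟨r, hr⟩
    rw [List.cons_append, List.nil_append] at hr
    exact (List.cons_eq_cons.mp hr).1.symm
  · intro he; exact ⟨l.drop (m + 1), by rw [he]; rfl⟩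

theorem pvEscAt_false_of_ne (l : List Char) (i : Nat) (h : i < l.length)
    (hne : l[i] ≠ '%') : pvEscAt l i = false := by
  unfold pvEscAt
  rw [List.getD_eq_getElem l ' ' h]
  simp [hne]

theorem pvEscAt_false_of_short (l : List Char) (i : Nat) (h : ¬ i + 2 < l.length) :
    pvEscAt l i = false := by
  unfold pvEscAt
  simp [h]

theorem pvGoA_end (l : List Char) (i : Nat) (acc : List Char) (h : l.length ≤ i) :
    pvGoA l i acc = acc := by
  rw [pvGoA, dif_neg (by omega)]

-- while no escape can start, A emits exactly the translate of the region
theorem pvGoA_skip (d : Nat) : ∀ (l : List Char) (pos j : Nat) (acc : List Char),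
    j ≤ pos + d → pos ≤ j → j ≤ l.length →
    (∀ k, pos ≤ k → k < j → pvEscAt l k = false) →
    pvGoA l pos acc = pvGoA l j (acc ++ pvTranslate ((l.drop pos).take (j - pos))) := by
  induction d with
  | zero =>
    intro l pos j acc hd hpj _ _
    have : j = pos := by omega
    subst this
    simp [pvTranslate]
  | succ d ih =>
    intro l pos j acc hd hpj hjl hesc
    rcases Nat.eq_or_lt_of_le hpj with heq | hlt
    · subst heq; simp [pvTranslate]
    · have hp : pos < l.length := by omega
      rw [pvGoA, dif_pos hp, if_neg (by simp [hesc pos le_rfl hlt])]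
      rw [pvReplA_eq]
      rw [ih l (pos + 1) j _ (by omega) (by omega) hjl
        (fun k hk1 hk2 => hesc k (by omega) hk2)]
      congr 1
      rw [List.getD_eq_getElem l ' ' hp]
      have hdc : l.drop pos = l[pos] :: l.drop (pos + 1) := List.drop_eq_getElem_cons hp
      rw [hdc]
      have : j - pos = (j - (pos + 1)) + 1 := by omega
      rw [this, List.take_succ_cons]
      simp [pvTranslate, List.append_assoc]

-- one B step = several A steps
theorem pvGoA_eq_goB (d : Nat) : ∀ (l : List Char) (pos : Nat) (acc : List Char),
    l.length ≤ pos + d → pvGoA l pos acc = pvGoB l pos acc := by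
  induction d with
  | zero =>
    intro l pos acc hd
    rw [pvGoA_end l pos acc hd, pvGoB, dif_neg (by omega)]
  | succ d ih =>
    intro l pos acc hd
    by_cases hp : pos < l.length
    · rw [pvGoB, dif_pos hp]
      by_cases hj : PySem.Chars.findFrom l ['%'] (pos : Int) none = -1 ∨
          (l.length : Int) - 3 < PySem.Chars.findFrom l ['%'] (pos : Int) none
      · rw [dif_pos hj]
        -- no escape can start anywhere in [pos, len)
        have hesc : ∀ k, pos ≤ k → k < l.length → pvEscAt l k = false := by
          intro k hk1 hk2
          by_cases hm : PySem.Chars.findFrom l ['%'] (pos : Int) none = -1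
          · -- no '%' at all in the suffix
            have hno := (PySem.Chars.findFrom_natCast_eq_neg_one_iff l ['%'] pos
              (le_of_lt hp)).mp hm
            apply pvEscAt_false_of_ne l k hk2
            intro hc
            have hpre := (pvSingleton_prefix '%' l k hk2).mpr hc
            have hdk : l.drop k = (l.drop pos).drop (k - pos) := by
              rw [List.drop_drop]; congr 1; omega
            exact hno ((hdk ▸ hpre).isInfix.trans (List.drop_suffix _ _).isInfix)
          · -- the first '%' is at an index > len-3; before it no '%', after it too short
            have hsp := PySem.Chars.findFrom_natCast_spec l ['%'] pos (le_of_lt hp) hm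
            have h1 := hsp.1
            have h3 : (l.length : Int) - 3 <
                PySem.Chars.findFrom l ['%'] (pos : Int) none := hj.resolve_left hm
            by_cases hkj : k < (PySem.Chars.findFrom l ['%'] (pos : Int) none).toNat
            · exact pvEscAt_false_of_ne l k hk2 (fun hc =>
                hsp.2.2 k hk1 hkj ((pvSingleton_prefix '%' l k hk2).mpr hc))
            · exact pvEscAt_false_of_short l k (by omega)
        rw [pvGoA_skip (l.length - pos) l pos l.length acc (by omega) (by omega) le_rfl hesc]
        rw [pvGoA_end _ _ _ le_rfl]
        congr 2
        exact List.take_of_length_le (by simp)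
      · rw [dif_neg hj]
        obtain ⟨hm, h3⟩ := not_or.mp hj
        have hsp := PySem.Chars.findFrom_natCast_spec l ['%'] pos (le_of_lt hp) hm
        have h1 := hsp.1
        set jn := (PySem.Chars.findFrom l ['%'] (pos : Int) none).toNat with hjndef
        have hlt3 : jn + 3 ≤ l.length := by omega
        have hpj : pos ≤ jn := by omega
        have hjp : l[jn]'(by omega) = '%' := (pvSingleton_prefix '%' l jn (by omega)).mp hsp.2.1
        have hescfalse : ∀ k, pos ≤ k → k < jn → pvEscAt l k = false := fun k hk1 hk2 =>
          pvEscAt_false_of_ne l k (by omega) (fun hc =>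
            hsp.2.2 k hk1 hk2 ((pvSingleton_prefix '%' l k (by omega)).mpr hc))
        by_cases hhex : (pvIsHex (l.getD (jn + 1) ' ') && pvIsHex (l.getD (jn + 2) ' ')) = true
        · rw [if_pos hhex]
          have hescj : pvEscAt l jn = true := by
            unfold pvEscAt
            rw [List.getD_eq_getElem l ' ' (show jn < l.length by omega),
              List.getD_eq_getElem l ' ' (show jn + 1 < l.length by omega),
              List.getD_eq_getElem l ' ' (show jn + 2 < l.length by omega)]
            rw [List.getD_eq_getElem l ' ' (show jn + 1 < l.length by omega),
              List.getD_eq_getElem l ' ' (show jn + 2 < l.length by omega)] at hhex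
            simp only [Bool.and_eq_true] at hhex
            simp [hjp, show jn + 2 < l.length by omega, hhex.1, hhex.2]
          rw [pvGoA_skip (jn - pos) l pos jn acc (by omega) hpj (by omega) hescfalse]
          rw [pvGoA, dif_pos (show jn < l.length by omega), if_pos hescj]
          rw [ih l (jn + 3) _ (by omega)]
        · rw [if_neg hhex]
          have hescj : pvEscAt l jn = false := by
            unfold pvEscAt
            rw [List.getD_eq_getElem l ' ' (show jn + 1 < l.length by omega),
              List.getD_eq_getElem l ' ' (show jn + 2 < l.length by omega)] at hhex
            rw [List.getD_eq_getElem l ' ' (show jn + 1 < l.length by omega),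
              List.getD_eq_getElem l ' ' (show jn + 2 < l.length by omega)]
            cases hx : pvIsHex (l[jn + 1]'(by omega)) <;>
              cases hy : pvIsHex (l[jn + 2]'(by omega)) <;> simp_all
          rw [pvGoA_skip (jn + 1 - pos) l pos (jn + 1) acc (by omega) (by omega) (by omega)
            (fun k hk1 hk2 => by
              rcases Nat.lt_or_ge k jn with hk | hk
              · exact hescfalse k hk1 hk
              · have : k = jn := by omega
                subst this; exact hescj)]
          rw [ih l (jn + 1) _ (by omega)]
    · rw [pvGoA_end l pos acc (by omega), pvGoB, dif_neg hp]

-- ===== VERDICT (by name: the statement is the Claim_ definition above) =====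
theorem general_overlongutf8_spec : Claim_equal_general_overlongutf8 := by
  intro payload _
  unfold Spec_general_overlongutf8 general_overlongutf8 general_overlongutf8_alt
  by_cases h : payload.toList.isEmpty
  · rw [if_pos h, if_pos h]
  · rw [if_neg h, if_neg h]
    exact congrArg String.mk
      (pvGoA_eq_goB payload.toList.length payload.toList 0 [] (by omega))
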